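-- pv_equiv track=rewrite | github.com/igpp-ucla/MagPy4 | MagPy4/spectraUI.py | getVecGrps
-- ===== SOURCE A (Python) =====
-- def getVecGrps(dstrs):
--     found = []
--     for kw in ['BX','BY','BZ']:
--         f = []
--         for dstr in dstrs:
--             if kw.lower() in dstr.lower():
--                 f.append(dstr)
--         found.append(f)
--     return found
-- ===== SOURCE B (Python) =====
-- def getVecGrps(dstrs):
--     bx, by, bz = [], [], []
--     for dstr in dstrs:
--         dl = dstr.lower()
--         if 'bx' in dl:
--             bx.append(dstr)
--         if 'by' in dl:
--             by.append(dstr)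
--         if 'bz' in dl:
--             bz.append(dstr)
--     return [bx, by, bz]
-- ===== Notes on version B (the rewrite author's own statement) =====
-- stated objective: alternative
-- what changed: Single pass over dstrs maintaining three result lists (lowercasing each string once), instead of three full keyword-wise passes each re-lowering every string.
import Mathlib
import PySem

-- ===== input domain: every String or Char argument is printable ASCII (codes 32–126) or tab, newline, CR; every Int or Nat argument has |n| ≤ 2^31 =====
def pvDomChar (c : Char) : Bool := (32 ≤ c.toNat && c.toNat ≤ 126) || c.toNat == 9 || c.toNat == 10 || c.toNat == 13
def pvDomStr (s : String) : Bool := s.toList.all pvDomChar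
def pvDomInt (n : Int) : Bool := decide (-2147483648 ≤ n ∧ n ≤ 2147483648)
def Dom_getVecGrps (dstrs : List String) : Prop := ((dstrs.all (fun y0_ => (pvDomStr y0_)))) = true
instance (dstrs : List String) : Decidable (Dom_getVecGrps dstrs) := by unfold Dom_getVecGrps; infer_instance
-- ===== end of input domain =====

-- B is an alternative single-pass grouping: one traversal of dstrs maintaining the three groups,
-- lowercasing each string once, instead of A's three keyword-wise passes.

-- ===== PORT A =====
-- A: for kw in ['BX','BY','BZ']: filter dstrs by 'kw.lower() in dstr.lower()', collect the three lists.
def getVecGrps (dstrs : List String) : List (List String) :=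
  (["BX", "BY", "BZ"]).foldl
    (fun found kw =>
      found ++ [dstrs.foldl
        (fun f dstr =>
          if PySem.Str.isIn (PySem.Str.lower kw) (PySem.Str.lower dstr) then f ++ [dstr] else f)
        []])
    []

-- ===== PORT B =====
-- B: one pass over dstrs; dl = dstr.lower() once; append dstr to each of bx/by/bz whose keyword occurs in dl.
def getVecGrps_alt (dstrs : List String) : List (List String) :=
  let st := dstrs.foldl
    (fun (st : List String × List String × List String) dstr =>
      let dl := PySem.Str.lower dstr
      let bx := if PySem.Str.isIn "bx" dl then st.1 ++ [dstr] else st.1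
      let by_ := if PySem.Str.isIn "by" dl then st.2.1 ++ [dstr] else st.2.1
      let bz := if PySem.Str.isIn "bz" dl then st.2.2 ++ [dstr] else st.2.2
      (bx, by_, bz))
    ([], [], [])
  [st.1, st.2.1, st.2.2]

-- ===== PRECONDITION & SPEC =====
def Spec_getVecGrps (dstrs : List String) (out : List (List String)) : Prop := out = getVecGrps_alt dstrs
instance (dstrs : List String) (out : List (List String)) : Decidable (Spec_getVecGrps dstrs out) := by unfold Spec_getVecGrps; infer_instance

-- ===== CLAIM (what is proved, stated in full; the proofs are below) =====
def Claim_equal_getVecGrps : Prop := ∀ (dstrs : List String), Dom_getVecGrps dstrs → Spec_getVecGrps dstrs (getVecGrps dstrs)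

-- ===== LEMMAS AND PROOFS =====

-- B's single fold over the triple computes the three independent keyword folds.
theorem fold3_split (dstrs : List String) (a b c : List String) :
    dstrs.foldl
      (fun (st : List String × List String × List String) dstr =>
        let dl := PySem.Str.lower dstr
        let bx := if PySem.Str.isIn "bx" dl then st.1 ++ [dstr] else st.1
        let by_ := if PySem.Str.isIn "by" dl then st.2.1 ++ [dstr] else st.2.1
        let bz := if PySem.Str.isIn "bz" dl then st.2.2 ++ [dstr] else st.2.2
        (bx, by_, bz))
      (a, b, c)
    = (dstrs.foldl (fun f dstr => if PySem.Str.isIn "bx" (PySem.Str.lower dstr) then f ++ [dstr] else f) a,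
       dstrs.foldl (fun f dstr => if PySem.Str.isIn "by" (PySem.Str.lower dstr) then f ++ [dstr] else f) b,
       dstrs.foldl (fun f dstr => if PySem.Str.isIn "bz" (PySem.Str.lower dstr) then f ++ [dstr] else f) c) := by
  induction dstrs generalizing a b c with
  | nil => rfl
  | cons d t ih => simp only [List.foldl]; exact ih _ _ _

theorem lower_BX : PySem.Str.lower "BX" = "bx" := by decide
theorem lower_BY : PySem.Str.lower "BY" = "by" := by decide
theorem lower_BZ : PySem.Str.lower "BZ" = "bz" := by decide

-- ===== VERDICT (by name: the statement is the Claim_ definition above) =====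
theorem getVecGrps_spec : Claim_equal_getVecGrps := by
  intro dstrs _
  unfold Spec_getVecGrps getVecGrps getVecGrps_alt
  simp only [List.foldl, lower_BX, lower_BY, lower_BZ, fold3_split, List.nil_append, List.append_assoc, List.cons_append]
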